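-- pv_equiv track=rewrite | github.com/Bastos-abc/Internet_Graph | reading_files.py | valley_free_verification
-- ===== SOURCE A (Python) =====
-- def valley_free_verification(as_path_rel=[]):
--     """
--     :param as_path_rel: list of ASN, AS path relationship information
--     :return: Valley Free is True or False
--     Sequence in AS path -1 P2C , 1 C2P  or
--     -1, * , 1 = Valley-free violation
--     """
--     got_provider = False
--     for apr in as_path_rel:
--         if apr == -1:
--             got_provider = True
--         elif got_provider:
--             if apr == 1:
--                 return False
--     # with regex
--     # valley_expr = "*[-2,0-9]+[-1]*[-2,-1,0,2-9]+[1]*[-2,-1,0,-9]"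
--     # evaluate = ''.join(str(x) for x in as_path_rel)
--     # if re.search(valley_expr, evaluate):
--     #    return False
--
--     return True
-- ===== SOURCE B (Python) =====
-- def valley_free_verification(as_path_rel=[]):
--     # Valley-free holds iff the last customer-to-provider hop (1) occurs
--     # strictly before the first provider-to-customer hop (-1).
--     first_prov = next((i for i, x in enumerate(as_path_rel) if x == -1),
--                       len(as_path_rel))
--     last_up = next((i for i in reversed(range(len(as_path_rel)))
--                     if as_path_rel[i] == 1), -1)
--     return last_up < first_prov
-- ===== Notes on version B (the rewrite author's own statement) =====
-- stated objective: alternative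
-- what changed: Replaces the flag-driven scan by an index-arithmetic formulation: compute the first index of -1 (forward search) and the last index of 1 (backward search) and return last_up < first_prov, with no flag and no suffix membership test.
import Mathlib
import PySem

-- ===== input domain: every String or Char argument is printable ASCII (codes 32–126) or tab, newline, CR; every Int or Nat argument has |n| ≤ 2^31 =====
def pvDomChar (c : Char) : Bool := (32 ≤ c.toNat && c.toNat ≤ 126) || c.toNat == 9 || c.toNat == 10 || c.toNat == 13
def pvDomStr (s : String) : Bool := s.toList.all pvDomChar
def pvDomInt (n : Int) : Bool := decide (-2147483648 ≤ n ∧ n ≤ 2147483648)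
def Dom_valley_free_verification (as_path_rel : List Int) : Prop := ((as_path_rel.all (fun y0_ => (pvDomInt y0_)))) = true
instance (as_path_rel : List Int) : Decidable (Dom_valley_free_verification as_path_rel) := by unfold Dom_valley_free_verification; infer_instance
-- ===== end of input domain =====

-- B replaces A's flag-driven scan by index arithmetic: first index of -1 (forward search),
-- last index of 1 (backward search), return last_up < first_prov (objective: alternative).

-- ===== PORT A =====
-- the flag-driven loop with early return, step for step
def vfLoopA (got : Bool) (l : List Int) : Bool :=
  match l with
  | [] => true
  | apr :: rest =>
    if apr = -1 then vfLoopA true rest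
    else if got then (if apr = 1 then false else vfLoopA got rest)
    else vfLoopA got rest

def valley_free_verification (as_path_rel : List Int) : Bool :=
  vfLoopA false as_path_rel

-- ===== PORT B =====
-- first index of -1, or the length when absent (forward generator with default)
def vfFirstProv : List Int → Nat
  | [] => 0
  | a :: r => if a = -1 then 0 else vfFirstProv r + 1

-- backward search: walk the reversed list carrying the current index, -1 when absent
def vfLastUpGo : List Int → Int → Int
  | [], _ => -1
  | a :: r, i => if a = 1 then i else vfLastUpGo r (i - 1)

def valley_free_verification_alt (as_path_rel : List Int) : Bool :=
  decide (vfLastUpGo as_path_rel.reverse ((as_path_rel.length : Int) - 1)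
          < (vfFirstProv as_path_rel : Int))

-- ===== PRECONDITION & SPEC =====
def Spec_valley_free_verification (as_path_rel : List Int) (out : Bool) : Prop := out = valley_free_verification_alt as_path_rel
instance (as_path_rel : List Int) (out : Bool) : Decidable (Spec_valley_free_verification as_path_rel out) := by unfold Spec_valley_free_verification; infer_instance

-- ===== CLAIM (what is proved, stated in full; the proofs are below) =====
def Claim_equal_valley_free_verification : Prop := ∀ (as_path_rel : List Int), Dom_valley_free_verification as_path_rel → Spec_valley_free_verification as_path_rel (valley_free_verification as_path_rel)

-- ===== LEMMAS AND PROOFS =====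

-- once the flag is set, A returns False exactly when a 1 remains
theorem vfLoopA_true (l : List Int) : vfLoopA true l = !((1 : Int) ∈ l : Bool) := by
  induction l with
  | nil => simp [vfLoopA]
  | cons a rest ih =>
    simp only [vfLoopA]
    by_cases h : a = -1
    · simp [h, ih]
    · by_cases h1 : a = 1 <;> simp [h, h1, ih]
      exact fun _ e => h1 e.symm

-- A equals: if a -1 occurs, no 1 after the first -1; else true
theorem vfLoopA_false_char (l : List Int) :
    vfLoopA false l =
      if (-1 : Int) ∈ l then !((1 : Int) ∈ l.drop (vfFirstProv l + 1) : Bool) else true := by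
  induction l with
  | nil => simp [vfLoopA]
  | cons a rest ih =>
    by_cases h : a = -1
    · subst h
      simp [vfLoopA, vfFirstProv, vfLoopA_true]
    · have hstep : vfLoopA false (a :: rest) = vfLoopA false rest := by
        by_cases h1 : a = 1 <;> simp [vfLoopA, h, h1]
      rw [hstep, ih]
      have hmem : ((-1 : Int) ∈ a :: rest) ↔ ((-1 : Int) ∈ rest) := by
        constructor
        · intro hc
          rcases List.mem_cons.mp hc with e | hr
          · exact absurd e.symm h
          · exact hr
        · exact List.mem_cons_of_mem _
      by_cases hm : (-1 : Int) ∈ rest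
      · rw [if_pos (hmem.mpr hm), if_pos hm]
        simp [vfFirstProv, h]
      · rw [if_neg (fun hc => hm (hmem.mp hc)), if_neg hm]

-- vfFirstProv when -1 absent / present
theorem vfFirstProv_not_mem (l : List Int) (h : (-1 : Int) ∉ l) : vfFirstProv l = l.length := by
  induction l with
  | nil => simp [vfFirstProv]
  | cons a rest ih =>
    have ha : a ≠ -1 := fun e => h (by simp [e])
    simp [vfFirstProv, ha, ih (fun hr => h (List.mem_cons_of_mem _ hr))]

theorem vfFirstProv_mem (l : List Int) (h : (-1 : Int) ∈ l) :
    vfFirstProv l < l.length ∧ l[vfFirstProv l]? = some (-1) := by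
  induction l with
  | nil => simp at h
  | cons a rest ih =>
    by_cases ha : a = -1
    · subst ha; simp [vfFirstProv]
    · have hr : (-1 : Int) ∈ rest := by
        rcases List.mem_cons.mp h with e | hr
        · exact absurd e.symm ha
        · exact hr
      obtain ⟨h1, h2⟩ := ih hr
      refine ⟨?_, ?_⟩
      · simp [vfFirstProv, ha]; omega
      · simp [vfFirstProv, ha, h2]

-- backward search when 1 absent
theorem vfLastUpGo_not_mem (m : List Int) (i : Int) (h : (1 : Int) ∉ m) :
    vfLastUpGo m i = -1 := by
  induction m generalizing i with
  | nil => simp [vfLastUpGo]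
  | cons a r ih =>
    have ha : a ≠ 1 := fun e => h (by simp [e])
    simp [vfLastUpGo, ha, ih (i - 1) (fun hr => h (List.mem_cons_of_mem _ hr))]

-- backward search when 1 present: returns i - k where k is the FIRST index of 1 in m
theorem vfLastUpGo_mem (m : List Int) (i : Int) (h : (1 : Int) ∈ m) :
    ∃ k : Nat, k < m.length ∧ m[k]? = some 1 ∧
      (∀ j : Nat, j < k → m[j]? ≠ some 1) ∧ vfLastUpGo m i = i - k := by
  induction m generalizing i with
  | nil => simp at h
  | cons a r ih =>
    by_cases ha : a = 1
    · subst ha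
      exact ⟨0, by simp, by simp, fun j hj => absurd hj (by omega), by simp [vfLastUpGo]⟩
    · have hr : (1 : Int) ∈ r := by
        rcases List.mem_cons.mp h with e | hr
        · exact absurd e.symm ha
        · exact hr
      obtain ⟨k, hk, hget, hfirst, hgo⟩ := ih (i - 1) hr
      refine ⟨k + 1, by simp; omega, by simpa using hget, ?_, ?_⟩
      · intro j hj
        cases j with
        | zero => simpa using ha
        | succ j' => simpa using hfirst j' (by omega)
      · simp only [vfLastUpGo, if_neg ha, hgo]
        push_cast; ring

-- membership in a drop via getElem?
theorem mem_drop_iff (l : List Int) (n : Nat) (x : Int) :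
    x ∈ l.drop n ↔ ∃ j : Nat, n ≤ j ∧ l[j]? = some x := by
  constructor
  · intro h
    obtain ⟨i, hi⟩ := List.mem_iff_getElem?.mp h
    exact ⟨n + i, by omega, by rw [← List.getElem?_drop]; exact hi⟩
  · rintro ⟨j, hn, hj⟩
    have : (l.drop n)[j - n]? = some x := by
      rw [List.getElem?_drop]; rwa [show n + (j - n) = j by omega]
    exact List.mem_iff_getElem?.mpr ⟨j - n, this⟩

-- reverse index bridge
theorem getElem?_reverse' (l : List Int) (k : Nat) (hk : k < l.length) :
    l.reverse[k]? = l[l.length - 1 - k]? := by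
  rw [List.getElem?_eq_getElem (by simpa using hk),
      List.getElem?_eq_getElem (by omega)]
  simp [List.getElem_reverse]

-- ===== VERDICT helper: full equality =====
theorem vf_eq_alt (l : List Int) :
    valley_free_verification l = valley_free_verification_alt l := by
  unfold valley_free_verification valley_free_verification_alt
  rw [vfLoopA_false_char]
  by_cases h1 : (1 : Int) ∈ l
  · have h1r : (1 : Int) ∈ l.reverse := by simpa using h1
    obtain ⟨k, hk, hget, hfirst, hgo⟩ := vfLastUpGo_mem l.reverse ((l.length : Int) - 1) h1r
    rw [hgo]
    have hklen : k < l.length := by simpa using hk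
    -- p := position of the LAST 1 in l
    set p : Nat := l.length - 1 - k with hp
    have hpget : l[p]? = some 1 := by
      rw [← getElem?_reverse' l k hklen] at *; exact hget
    have hlast : ∀ j : Nat, p < j → j < l.length → l[j]? ≠ some 1 := by
      intro j hpj hjlen
      have hj' : l.length - 1 - j < k := by omega
      have := hfirst _ hj'
      rwa [getElem?_reverse' l _ (by omega), show l.length - 1 - (l.length - 1 - j) = j by omega] at this
    by_cases hm : (-1 : Int) ∈ l
    · rw [if_pos hm]
      obtain ⟨hF, hFget⟩ := vfFirstProv_mem l hm
      set F : Nat := vfFirstProv l with hFdef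
      have hpF : p ≠ F := by
        intro e; rw [e, hFget] at hpget; simp at hpget
      have key : ((1 : Int) ∈ l.drop (F + 1)) ↔ F < p := by
        constructor
        · intro hmem
          obtain ⟨j, hnj, hjget⟩ := (mem_drop_iff l (F + 1) 1).mp hmem
          have hjlen : j < l.length := by
            by_contra hc
            rw [List.getElem?_eq_none (by omega)] at hjget; simp at hjget
          have : ¬ p < j := fun hc => hlast j hc hjlen hjget
          omega
        · intro hFp
          exact (mem_drop_iff l (F + 1) 1).mpr ⟨p, by omega, hpget⟩
      by_cases hFp : F < p
      · have : ¬ ((l.length : Int) - 1 - k < (F : Int)) := by omega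
        simp [key.mpr hFp |> fun h => h, this]
      · have hplt : p < F := by omega
        have : ((l.length : Int) - 1 - k < (F : Int)) := by omega
        simp [key, this, hFp]
    · rw [if_neg hm]
      have : ((l.length : Int) - 1 - k < (vfFirstProv l : Int)) := by
        rw [vfFirstProv_not_mem l hm]; omega
      simp [this]
  · -- no 1 at all: both sides true
    have hgo : vfLastUpGo l.reverse ((l.length : Int) - 1) = -1 :=
      vfLastUpGo_not_mem _ _ (by simpa using h1)
    have h1d : ∀ n, (1 : Int) ∉ l.drop n := fun n hc => h1 (List.mem_of_mem_drop hc)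
    rw [hgo]
    have : (-1 : Int) < (vfFirstProv l : Int) := by omega
    by_cases hm : (-1 : Int) ∈ l <;> simp [hm, h1d, this]

-- ===== VERDICT (by name: the statement is the Claim_ definition above) =====
theorem valley_free_verification_spec : Claim_equal_valley_free_verification := by
  intro l _
  unfold Spec_valley_free_verification
  exact vf_eq_alt l
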